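-- pv_equiv track=rewrite | github.com/Vskesha/PYTHON_JUN_3_28_01_25 | homework15/main_bad_style.py | rechennya
-- ===== SOURCE A (Python) =====
-- def rechennya(text):
--     counter = 0
--     i = 0
--     while i < len(text):
--         if text[i] in ".!?":
--             counter += 1
--             while i < len(text) and not text[i].isalpha():
--                 i += 1
--         i += 1
--
--     return counter
-- ===== SOURCE B (Python) =====
-- def _runs(s):
--     # split s into maximal runs of characters with equal .isalpha() key
--     runs = []
--     i = 0
--     while i < len(s):
--         j = i
--         while j < len(s) and s[j].isalpha() == s[i].isalpha():
--             j += 1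
--         runs.append((s[i].isalpha(), s[i:j]))
--         i = j
--     return runs
--
--
-- def rechennya(text):
--     return sum(1 for is_alpha, seg in _runs(text)
--                if not is_alpha and any(c in ".!?" for c in seg))
-- ===== Notes on version B (the rewrite author's own statement) =====
-- stated objective: alternative
-- what changed: B splits the text into maximal runs of characters with equal isalpha key and counts the non-alpha runs that contain a terminator, replacing A's single index scan with a nested skip-ahead loop by a segment-then-test decomposition.
import Mathlib
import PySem

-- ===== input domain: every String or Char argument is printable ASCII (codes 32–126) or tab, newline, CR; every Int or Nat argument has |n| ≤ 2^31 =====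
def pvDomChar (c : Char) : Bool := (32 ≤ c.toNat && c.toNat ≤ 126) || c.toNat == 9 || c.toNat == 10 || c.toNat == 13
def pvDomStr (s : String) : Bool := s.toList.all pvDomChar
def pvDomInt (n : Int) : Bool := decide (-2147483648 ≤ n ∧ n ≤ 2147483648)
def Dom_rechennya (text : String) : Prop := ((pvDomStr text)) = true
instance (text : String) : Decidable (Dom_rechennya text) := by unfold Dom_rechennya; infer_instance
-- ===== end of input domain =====

-- B counts sentence terminators by splitting the text into maximal runs of equal
-- isalpha-key and counting the non-alpha runs containing a terminator, instead of
-- A's index scan with a nested skip loop; objective: alternative (same O(n) cost).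

-- c in ".!?"
def pvIsTerm (c : Char) : Bool := c == '.' || c == '!' || c == '?'

-- ===== PORT A =====
-- inner while: advance i while i < len(text) and not text[i].isalpha()
def pvSkipA (l : List Char) (i : Nat) : Nat :=
  if h : i < l.length then
    if PySem.Chars.isalpha l[i] then i else pvSkipA l (i + 1)
  else i
termination_by l.length - i

theorem pvSkipA_ge (l : List Char) (i : Nat) : i ≤ pvSkipA l i := by
  unfold pvSkipA
  split
  · split
    · exact le_refl i
    · exact le_trans (Nat.le_succ i) (pvSkipA_ge l (i + 1))
  · exact le_refl i
termination_by l.length - i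

-- outer while over index i with the running counter
def pvLoopA (l : List Char) (i : Nat) (counter : Int) : Int :=
  if h : i < l.length then
    if pvIsTerm l[i] then pvLoopA l (pvSkipA l i + 1) (counter + 1)
    else pvLoopA l (i + 1) counter
  else counter
termination_by l.length - i
decreasing_by
  · have := pvSkipA_ge l i; omega
  · omega

def rechennya (text : String) : Int := pvLoopA text.toList 0 0

-- ===== PORT B =====
-- _runs: maximal runs of characters with equal isalpha key (inner scan = takeWhile/dropWhile)
def pvRuns (l : List Char) : List (Bool × List Char) :=
  match l with
  | [] => []
  | c :: cs =>
    (PySem.Chars.isalpha c,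
      c :: cs.takeWhile (fun d => PySem.Chars.isalpha d == PySem.Chars.isalpha c)) ::
      pvRuns (cs.dropWhile (fun d => PySem.Chars.isalpha d == PySem.Chars.isalpha c))
termination_by l.length
decreasing_by
  have := List.length_dropWhile_le (fun d => PySem.Chars.isalpha d == PySem.Chars.isalpha c) cs
  simp; omega

-- sum(1 for is_alpha, seg in _runs(text) if not is_alpha and any(c in ".!?" for c in seg))
def rechennya_alt (text : String) : Int :=
  (((pvRuns text.toList).filter (fun r => !r.1 && r.2.any pvIsTerm)).length : Int)

-- ===== PRECONDITION & SPEC =====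
def Spec_rechennya (text : String) (out : Int) : Prop := out = rechennya_alt text
instance (text : String) (out : Int) : Decidable (Spec_rechennya text out) := by unfold Spec_rechennya; infer_instance

-- ===== CLAIM (what is proved, stated in full; the proofs are below) =====
def Claim_equal_rechennya : Prop := ∀ (text : String), Dom_rechennya text → Spec_rechennya text (rechennya text)

-- ===== LEMMAS AND PROOFS =====

-- reference count: suffix state machine equivalent to A's loop
mutual
def pvCnt : List Char → Int
  | [] => 0
  | c :: cs => if pvIsTerm c then 1 + pvSkipC cs else pvCnt cs
def pvSkipC : List Char → Int
  | [] => 0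
  | c :: cs => if PySem.Chars.isalpha c then pvCnt cs else pvSkipC cs
end

theorem pvIsTerm_not_alpha (c : Char) (h : pvIsTerm c = true) :
    PySem.Chars.isalpha c = false := by
  simp [pvIsTerm] at h
  rcases h with (rfl | rfl) | rfl <;> decide

theorem pvAlpha_not_term (c : Char) (h : PySem.Chars.isalpha c = true) :
    pvIsTerm c = false := by
  cases hT : pvIsTerm c
  · rfl
  · rw [pvIsTerm_not_alpha c hT] at h; cases h

theorem pvSkipA_cnt (l : List Char) (i : Nat) :
    pvSkipC (l.drop i) = pvCnt (l.drop (pvSkipA l i + 1)) := by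
  unfold pvSkipA
  split
  · rename_i h
    rw [List.drop_eq_getElem_cons h]
    split
    · rename_i ha
      simp only [pvSkipC, ha, if_pos]
    · rename_i ha
      simp only [pvSkipC, ha, if_neg, Bool.false_eq_true, not_false_iff]
      exact pvSkipA_cnt l (i + 1)
  · rename_i h
    rw [List.drop_eq_nil_of_le (by omega), List.drop_eq_nil_of_le (by omega)]
    simp [pvSkipC, pvCnt]
termination_by l.length - i

theorem pvLoopA_cnt (l : List Char) (i : Nat) (c : Int) :
    pvLoopA l i c = c + pvCnt (l.drop i) := by
  unfold pvLoopA
  split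
  · rename_i h
    rw [List.drop_eq_getElem_cons h]
    split
    · rename_i ht
      have hna := pvIsTerm_not_alpha _ ht
      have hski : pvSkipA l i = pvSkipA l (i + 1) := by
        rw [pvSkipA]; simp [h, hna]
      rw [pvLoopA_cnt l (pvSkipA l i + 1) (c + 1)]
      simp only [pvCnt, ht, if_pos]
      rw [hski, ← pvSkipA_cnt l (i + 1)]
      ring
    · rename_i ht
      rw [pvLoopA_cnt l (i + 1) c]
      simp only [pvCnt, ht, if_neg, Bool.false_eq_true, not_false_iff]
  · rename_i h
    rw [List.drop_eq_nil_of_le (by omega)]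
    simp [pvCnt]
termination_by l.length - i
decreasing_by
  all_goals
    have h1 := pvSkipA_ge l i
    have h2 := pvSkipA_ge l (i + 1)
    omega

-- B's count, as an Int, with its unfolding on one run
def pvCountRuns (l : List Char) : Int :=
  (((pvRuns l).filter (fun r => !r.1 && r.2.any pvIsTerm)).length : Int)

theorem pvCnt_alpha_run (r rest : List Char) (h : ∀ c ∈ r, PySem.Chars.isalpha c = true) :
    pvCnt (r ++ rest) = pvCnt rest := by
  induction r with
  | nil => rfl
  | cons c rs ih =>
    have hc : PySem.Chars.isalpha c = true := h c (by simp)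
    simp only [List.cons_append, pvCnt, pvAlpha_not_term c hc, Bool.false_eq_true, if_neg,
      not_false_iff]
    exact ih (fun d hd => h d (by simp [hd]))

theorem pvSkipC_nonalpha_run (r rest : List Char)
    (h : ∀ c ∈ r, PySem.Chars.isalpha c = false)
    (hrest : rest = [] ∨ ∃ a t, rest = a :: t ∧ PySem.Chars.isalpha a = true) :
    pvSkipC (r ++ rest) = pvCnt rest := by
  induction r with
  | nil =>
    rcases hrest with h0 | ⟨a, t, h0, ha⟩
    · subst h0; rfl
    · subst h0
      simp only [List.nil_append, pvSkipC, pvCnt, ha, if_pos, pvAlpha_not_term a ha,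
        Bool.false_eq_true, if_neg, not_false_iff]
  | cons c rs ih =>
    have hc : PySem.Chars.isalpha c = false := h c (by simp)
    simp only [List.cons_append, pvSkipC, hc, Bool.false_eq_true, if_neg, not_false_iff]
    exact ih (fun d hd => h d (by simp [hd]))

theorem pvCnt_nonalpha_run (r rest : List Char)
    (h : ∀ c ∈ r, PySem.Chars.isalpha c = false)
    (hrest : rest = [] ∨ ∃ a t, rest = a :: t ∧ PySem.Chars.isalpha a = true) :
    pvCnt (r ++ rest) = (if r.any pvIsTerm then 1 else 0) + pvCnt rest := by
  induction r with
  | nil => simp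
  | cons c rs ih =>
    by_cases ht : pvIsTerm c = true
    · simp only [List.cons_append, pvCnt, ht, if_pos, List.any_cons, Bool.true_or]
      rw [pvSkipC_nonalpha_run rs rest (fun d hd => h d (by simp [hd])) hrest]
    · have ht' : pvIsTerm c = false := by cases hT : pvIsTerm c; rfl; exact absurd hT ht
      simp only [List.cons_append, pvCnt, ht', Bool.false_eq_true, if_neg, not_false_iff,
        List.any_cons, Bool.false_or]
      exact ih (fun d hd => h d (by simp [hd]))

theorem pvHead_dropWhile {p : Char → Bool} (l : List Char) (a : Char) (t : List Char)
    (h : l.dropWhile p = a :: t) : p a = false := by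
  induction l with
  | nil => simp [List.dropWhile] at h
  | cons c cs ih =>
    rw [List.dropWhile_cons] at h
    split at h
    · exact ih h
    · rename_i hp
      injection h with h1 h2
      subst h1
      simpa using hp

theorem pvCountRuns_cons (c : Char) (cs : List Char) :
    pvCountRuns (c :: cs) =
      (if !PySem.Chars.isalpha c &&
          ((c :: cs.takeWhile (fun d => PySem.Chars.isalpha d == PySem.Chars.isalpha c)).any pvIsTerm)
        then 1 else 0) +
        pvCountRuns (cs.dropWhile (fun d => PySem.Chars.isalpha d == PySem.Chars.isalpha c)) := by
  simp only [pvCountRuns, pvRuns, List.filter_cons]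
  split
  · simp only [List.length_cons]; push_cast; ring
  · simp

theorem pvCountRuns_eq (l : List Char) : pvCountRuns l = pvCnt l := by
  induction hn : l.length using Nat.strong_induction_on generalizing l with
  | _ n ih =>
    cases l with
    | nil => simp [pvCountRuns, pvRuns, pvCnt]
    | cons c cs =>
      set p := fun d => PySem.Chars.isalpha d == PySem.Chars.isalpha c with hp
      have hsplit : cs.takeWhile p ++ cs.dropWhile p = cs := List.takeWhile_append_dropWhile
      have hdw : pvCountRuns (cs.dropWhile p) = pvCnt (cs.dropWhile p) := by
        apply ih (cs.dropWhile p).length _ _ rfl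
        have hlen : (cs.dropWhile p).length ≤ cs.length := List.length_dropWhile_le p cs
        subst hn; simp; omega
      have hcons : c :: cs = (c :: cs.takeWhile p) ++ cs.dropWhile p := by
        rw [List.cons_append, hsplit]
      have htw : ∀ d ∈ cs.takeWhile p, PySem.Chars.isalpha d = PySem.Chars.isalpha c := by
        intro d hd
        have := List.mem_takeWhile_imp hd
        simpa [hp] using this
      rw [pvCountRuns_cons, hdw]
      cases hk : PySem.Chars.isalpha c with
      | true =>
        conv_rhs => rw [hcons]
        rw [pvCnt_alpha_run (c :: cs.takeWhile p) (cs.dropWhile p)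
          (by intro d hd; rcases List.mem_cons.1 hd with h0 | h0
              · exact h0 ▸ hk
              · rw [htw d h0]; exact hk)]
        simp
      | false =>
        have hrest : cs.dropWhile p = [] ∨
            ∃ a t, cs.dropWhile p = a :: t ∧ PySem.Chars.isalpha a = true := by
          cases hdwl : cs.dropWhile p with
          | nil => exact Or.inl rfl
          | cons a t =>
            refine Or.inr ⟨a, t, rfl, ?_⟩
            have hfa := pvHead_dropWhile cs a t hdwl
            simp only [hp, beq_eq_false_iff_ne, ne_eq] at hfa
            cases ha : PySem.Chars.isalpha a
            · exact absurd (ha.trans hk.symm) hfa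
            · rfl
        conv_rhs => rw [hcons]
        rw [pvCnt_nonalpha_run (c :: cs.takeWhile p) (cs.dropWhile p)
          (by intro d hd; rcases List.mem_cons.1 hd with h0 | h0
              · exact h0 ▸ hk
              · rw [htw d h0]; exact hk) hrest]
        simp [hp, hk]

-- ===== VERDICT (by name: the statement is the Claim_ definition above) =====
theorem rechennya_spec : Claim_equal_rechennya := by
  intro text _
  show rechennya text = rechennya_alt text
  rw [rechennya, pvLoopA_cnt, List.drop_zero, zero_add]
  exact (pvCountRuns_eq text.toList).symm
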